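-- pv_equiv track=rewrite | github.com/james5635/GeekForGeek-Data-Structure-and-Algorithm | logic_building/number_is_divisible_by_13/alternating_sum_of_3_digit_blocks.py | check_division_by_13
-- ===== SOURCE A (Python) =====
-- def check_division_by_13(num: str) -> bool:
--     """
--     >>> check_division_by_13("1234567589333862")
--     False
--     """
--     num_len = len(num)
--     if num_len == 1 and num[0] == "0":
--         return True
--     if num_len % 3 == 1:
--         num += "00"
--         num_len += 2
--
--     elif num_len % 3 == 2:
--         num += "0"
--         num_len += 1
--
--     sum = 0
--     pos = +1
--
--     i = num_len - 1
--     while i >= 0: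
--         group_sum = 0
--         group_sum += int(num[i])
--         i -= 1
--         group_sum += int(num[i]) * 10
--         i -= 1
--         group_sum += int(num[i]) * 100
--         i -= 1
--
--         sum += group_sum * pos
--         pos *= -1
--     return sum % 13 == 0
-- ===== SOURCE B (Python) =====
-- def check_division_by_13(num: str) -> bool:
--     # Horner's method: reduce the decimal string mod 13 left-to-right.
--     r = 0
--     for c in num:
--         r = (r * 10 + int(c)) % 13
--     return r == 0
-- ===== Notes on version B (the rewrite author's own statement) =====
-- stated objective: simpler
-- what changed: Replaces the pad-to-multiple-of-3 alternating 3-digit-block-sum scan from the right with a single left-to-right Horner reduction r = (r*10 + digit) % 13.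
import Mathlib
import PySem

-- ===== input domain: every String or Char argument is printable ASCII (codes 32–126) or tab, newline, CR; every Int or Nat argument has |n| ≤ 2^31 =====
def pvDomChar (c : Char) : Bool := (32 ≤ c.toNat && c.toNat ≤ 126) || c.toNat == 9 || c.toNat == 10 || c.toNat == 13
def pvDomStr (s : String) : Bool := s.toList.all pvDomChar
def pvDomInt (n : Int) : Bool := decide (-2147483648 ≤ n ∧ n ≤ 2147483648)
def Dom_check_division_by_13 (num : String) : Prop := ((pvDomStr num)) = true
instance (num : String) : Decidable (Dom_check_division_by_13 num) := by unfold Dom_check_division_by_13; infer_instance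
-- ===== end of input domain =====

-- B replaces A's pad-and-alternating-3-digit-block-sum scan with a left-to-right Horner
-- reduction mod 13 (objective: simpler); same digit-strings domain, same results.

-- int(c) for a one-character string c; the default 0 is only reached where Python's
-- int() raises ValueError, which Pre_check_division_by_13 excludes.
def intOfChar (c : Char) : Int := (PySem.Int.ofChars? [c]).getD 0

-- ===== PORT A =====
-- s[i] via pyGetD: inside Pre_ the padded length is a multiple of 3, so every index the
-- loop reads is in range and the default '0' is never used.
def chAt (s : List Char) (i : Int) : Int := intOfChar (PySem.List.pyGetD s i '0')

-- the while-loop of A: group_sum over s[i], s[i-1], s[i-2]; sum += group_sum * pos; pos *= -1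
def aLoop (s : List Char) (i : Int) (sum pos : Int) : Int :=
  if _h : 0 ≤ i then
    aLoop s (i - 3) (sum + (chAt s i + chAt s (i - 1) * 10 + chAt s (i - 2) * 100) * pos)
      (pos * (-1))
  else sum
termination_by (i + 1).toNat
decreasing_by omega

def check_division_by_13 (num : String) : Bool :=
  let l := num.toList
  let num_len : Int := l.length
  if num_len = 1 ∧ PySem.List.pyGetD l 0 ' ' = '0' then true
  else
    let p : List Char × Int :=
      if PySem.Int.mod num_len 3 = 1 then (l ++ ['0', '0'], num_len + 2)
      else if PySem.Int.mod num_len 3 = 2 then (l ++ ['0'], num_len + 1)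
      else (l, num_len)
    PySem.Int.mod (aLoop p.1 (p.2 - 1) 0 1) 13 == 0

-- ===== PORT B =====
def check_division_by_13_alt (num : String) : Bool :=
  num.toList.foldl (fun r c => PySem.Int.mod (r * 10 + intOfChar c) 13) 0 == 0

-- ===== PRECONDITION & SPEC =====
-- Pre_ excludes exactly the inputs containing a non-digit character, on which Python's
-- int() — and hence both A and B — raises ValueError.
def Pre_check_division_by_13 (num : String) : Prop :=
  num.toList.all PySem.Chars.isdigit = true
instance (num : String) : Decidable (Pre_check_division_by_13 num) := by
  unfold Pre_check_division_by_13; infer_instance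
def pvWitness_check_division_by_13 : String := "26"
def Spec_check_division_by_13 (num : String) (out : Bool) : Prop := out = check_division_by_13_alt num
instance (num : String) (out : Bool) : Decidable (Spec_check_division_by_13 num out) := by unfold Spec_check_division_by_13; infer_instance

-- ===== CLAIM (what is proved, stated in full; the proofs are below) =====
def Claim_equal_check_division_by_13 : Prop := ∀ (num : String), Dom_check_division_by_13 num → Pre_check_division_by_13 num → Spec_check_division_by_13 num (check_division_by_13 num)

-- ===== LEMMAS AND PROOFS =====

-- digit value of a character
def dval (c : Char) : Int := (c.toNat : Int) - 48

-- plain decimal value accumulator (no mod): the common semantic yardstick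
def decVal (r : Int) (l : List Char) : Int := l.foldl (fun a c => a * 10 + dval c) r

theorem char_eq_of_toNat {c d : Char} (h : c.val.toNat = d.val.toNat) : c = d :=
  Char.ext (UInt32.toNat_inj.mp h)

theorem intOfChar_digit (c : Char) (h : PySem.Chars.isdigit c = true) :
    intOfChar c = dval c := by
  unfold intOfChar dval
  simp [PySem.Chars.isdigit, Char.le_def, UInt32.le_iff_toNat_le] at h
  obtain ⟨h1, h2⟩ := h
  have h1' : 48 ≤ c.val.toNat := h1
  have h2' : c.val.toNat ≤ 57 := h2
  interval_cases hv : c.val.toNat <;>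
    first
    | (rw [char_eq_of_toNat (c := c) (d := '0') (by rw [hv]; rfl)]; decide)
    | (rw [char_eq_of_toNat (c := c) (d := '1') (by rw [hv]; rfl)]; decide)
    | (rw [char_eq_of_toNat (c := c) (d := '2') (by rw [hv]; rfl)]; decide)
    | (rw [char_eq_of_toNat (c := c) (d := '3') (by rw [hv]; rfl)]; decide)
    | (rw [char_eq_of_toNat (c := c) (d := '4') (by rw [hv]; rfl)]; decide)
    | (rw [char_eq_of_toNat (c := c) (d := '5') (by rw [hv]; rfl)]; decide)
    | (rw [char_eq_of_toNat (c := c) (d := '6') (by rw [hv]; rfl)]; decide)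
    | (rw [char_eq_of_toNat (c := c) (d := '7') (by rw [hv]; rfl)]; decide)
    | (rw [char_eq_of_toNat (c := c) (d := '8') (by rw [hv]; rfl)]; decide)
    | (rw [char_eq_of_toNat (c := c) (d := '9') (by rw [hv]; rfl)]; decide)

theorem pymod13 (a : Int) : PySem.Int.mod a 13 = a % 13 := by
  show a.fmod 13 = _; rw [Int.fmod_eq_emod]; simp

theorem pymod3 (a : Int) : PySem.Int.mod a 3 = a % 3 := by
  show a.fmod 3 = _; rw [Int.fmod_eq_emod]; simp

-- ---- B side: the Horner fold computes decVal mod 13 ----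
theorem foldB_eq (l : List Char) (hd : ∀ c ∈ l, PySem.Chars.isdigit c = true) :
    ∀ r : Int,
      l.foldl (fun r c => PySem.Int.mod (r * 10 + intOfChar c) 13) (r % 13) = decVal r l % 13 := by
  induction l with
  | nil => intro r; simp [decVal]
  | cons c t ih =>
    intro r
    have hc := hd c (by simp)
    have ht : ∀ x ∈ t, PySem.Chars.isdigit x = true := fun x hx => hd x (by simp [hx])
    simp only [List.foldl_cons, pymod13] at ih ⊢
    have e : (r % 13 * 10 + intOfChar c) % 13 = (r * 10 + dval c) % 13 := by
      rw [intOfChar_digit c hc]; omega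
    rw [e, ih ht (r * 10 + dval c)]
    simp [decVal]

-- ---- A side: closed characterisation of aLoop ----
-- alternating 3-digit block sum of the first m characters (rightmost block positive)
def salt (L : List Char) : Nat → Int
  | 0 => 0
  | 1 => 0
  | 2 => 0
  | (m + 3) =>
      (chAt L (m : Int) * 100 + chAt L ((m : Int) + 1) * 10 + chAt L ((m : Int) + 2)) - salt L m

theorem aLoop_eq (L : List Char) :
    ∀ m : Nat, m % 3 = 0 → ∀ sum pos : Int,
      aLoop L ((m : Int) - 1) sum pos = sum + pos * salt L m
  | 0, _, sum, pos => by
    rw [aLoop]; simp [salt]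
  | 1, h, _, _ => by omega
  | 2, h, _, _ => by omega
  | (k + 3), h, sum, pos => by
    have ih := aLoop_eq L k (by omega) (sum +
      (chAt L ((k : Int) + 2) + chAt L ((k : Int) + 1) * 10 + chAt L (k : Int) * 100) * pos)
      (pos * (-1))
    rw [aLoop, dif_pos (by push_cast; omega)]
    have e0 : ((k + 3 : Nat) : Int) - 1 = (k : Int) + 2 := by push_cast; ring
    rw [e0]
    have e1 : ((k : Int) + 2) - 1 = (k : Int) + 1 := by ring
    have e2 : ((k : Int) + 2) - 2 = (k : Int) := by ring
    have e3 : ((k : Int) + 2) - 3 = (k : Int) - 1 := by ring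
    rw [e1, e2, e3, ih]
    show _ = sum + pos * salt L (k + 3)
    rw [salt]
    ring

-- chAt at an in-range index of a digit list is the digit value
theorem chAt_eq (L : List Char) (hd : ∀ c ∈ L, PySem.Chars.isdigit c = true)
    (k : Nat) (hk : k < L.length) : chAt L (k : Int) = dval (L[k]) := by
  unfold chAt
  rw [PySem.List.pyGetD_natCast, List.getD_eq_getElem _ _ hk]
  exact intOfChar_digit _ (hd _ (List.getElem_mem hk))

theorem decVal_append (r : Int) (l1 l2 : List Char) :
    decVal r (l1 ++ l2) = decVal (decVal r l1) l2 := by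
  simp [decVal]

-- the alternating block sum agrees with the decimal value mod 13
theorem salt_mod (L : List Char) (hd : ∀ c ∈ L, PySem.Chars.isdigit c = true) :
    ∀ m : Nat, m % 3 = 0 → m ≤ L.length → (13 : Int) ∣ (decVal 0 (L.take m) - salt L m)
  | 0, _, _ => by simp [decVal, salt]
  | 1, h, _ => by omega
  | 2, h, _ => by omega
  | (k + 3), h, hm => by
    have ih := salt_mod L hd k (by omega) (by omega)
    have hk0 : k < L.length := by omega
    have hk1 : k + 1 < L.length := by omega
    have hk2 : k + 2 < L.length := by omega
    have ht : L.take (k + 3) = L.take k ++ [L[k], L[k + 1], L[k + 2]] := by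
      rw [List.take_add]
      congr 1
      apply List.ext_getElem
      · simp; omega
      · intro i h1 h2
        simp only [List.getElem_take, List.getElem_drop]
        have h3 : i < 3 := by simp at h2; omega
        interval_cases i <;> simp
    rw [ht, decVal_append]
    have hs : salt L (k + 3) =
        (dval (L[k]) * 100 + dval (L[k + 1]) * 10 + dval (L[k + 2])) - salt L k := by
      rw [salt, chAt_eq L hd k hk0,
          show ((k : Int) + 1) = ((k + 1 : Nat) : Int) by push_cast; ring,
          show ((k : Int) + 2) = ((k + 2 : Nat) : Int) by push_cast; ring,
          chAt_eq L hd (k + 1) hk1, chAt_eq L hd (k + 2) hk2]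
    rw [hs]
    have hb : decVal (decVal 0 (L.take k)) [L[k], L[k + 1], L[k + 2]] =
        1000 * decVal 0 (L.take k) +
          (dval (L[k]) * 100 + dval (L[k + 1]) * 10 + dval (L[k + 2])) := by
      simp [decVal]; ring
    rw [hb]
    omega

-- B's port tested as "decimal value mod 13 is zero"
theorem alt_iff (num : String) (hd : ∀ c ∈ num.toList, PySem.Chars.isdigit c = true) :
    check_division_by_13_alt num = true ↔ decVal 0 num.toList % 13 = 0 := by
  unfold check_division_by_13_alt
  have h0 : (0 : Int) = 0 % 13 := by norm_num
  rw [h0, foldB_eq num.toList hd 0]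
  simp

theorem dval_zero : dval '0' = 0 := by decide

theorem decVal_zeros (pad : List Char) (hpad : ∀ c ∈ pad, c = '0') :
    ∀ r : Int, decVal r pad = r * 10 ^ pad.length := by
  induction pad with
  | nil => intro r; simp [decVal]
  | cons c t ih =>
    intro r
    have hc0 : c = '0' := hpad c (by simp)
    have ht : ∀ x ∈ t, x = '0' := fun x hx => hpad x (by simp [hx])
    show decVal (r * 10 + dval c) t = _
    rw [hc0, dval_zero, add_zero, ih ht]
    rw [List.length_cons, pow_succ]
    ring

-- ===== VERDICT (by name: the statement is the Claim_ definition above) =====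
theorem check_division_by_13_spec : Claim_equal_check_division_by_13 := by
  unfold Claim_equal_check_division_by_13
  intro num _hdom hpre
  have hall : ∀ c ∈ num.toList, PySem.Chars.isdigit c = true := by
    simpa [Pre_check_division_by_13, List.all_eq_true] using hpre
  unfold Spec_check_division_by_13
  unfold check_division_by_13
  simp only []
  set l := num.toList with hl
  by_cases hsp : ((l.length : Int) = 1 ∧ PySem.List.pyGetD l 0 ' ' = '0')
  · -- special case: num = "0"; B also returns true
    rw [if_pos hsp]
    obtain ⟨hlen, hc⟩ := hsp
    have hlen1 : l.length = 1 := by omega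
    obtain ⟨c, hc'⟩ := List.length_eq_one_iff.mp hlen1
    have hcc : c = '0' := by
      rw [hc'] at hc; simpa [PySem.List.pyGetD] using hc
    subst hcc
    have hb : check_division_by_13_alt num = true := by
      rw [alt_iff num hall, ← hl, hc']; decide
    rw [hb]
  · rw [if_neg hsp]
    have hdig : ∀ c ∈ l, PySem.Chars.isdigit c = true := hall
    have key : ∀ (pad : List Char), (∀ c ∈ pad, c = '0') →
        (l.length + pad.length) % 3 = 0 →
        ((PySem.Int.mod (aLoop (l ++ pad) (((l.length : Int) + pad.length) - 1) 0 1) 13 == 0)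
          = check_division_by_13_alt num) := by
      intro pad hpad hm3
      set L := l ++ pad with hL
      have hdL : ∀ c ∈ L, PySem.Chars.isdigit c = true := by
        intro c hc
        rcases List.mem_append.mp hc with h | h
        · exact hdig c h
        · rw [hpad c h]; decide
      have hlen : ((l.length : Int) + pad.length) = (L.length : Int) := by
        simp [hL]
      have hm3L : L.length % 3 = 0 := by
        rw [hL]; simpa using hm3
      rw [hlen, aLoop_eq L L.length hm3L 0 1]
      have hsm := salt_mod L hdL L.length hm3L le_rfl
      rw [List.take_length] at hsm
      have hpadv : decVal 0 L = decVal 0 l * 10 ^ pad.length := by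
        rw [hL, decVal_append, decVal_zeros pad hpad]
      have hiff : (PySem.Int.mod (0 + 1 * salt L L.length) 13 = 0) ↔
          (decVal 0 l % 13 = 0) := by
        rw [pymod13]
        have h13 : Prime (13 : Int) := by
          rw [Int.prime_iff_natAbs_prime]; norm_num
        have hpow : (10 : Int) ^ pad.length % 13 ≠ 0 := by
          have hnd : ¬ (13 : Int) ∣ 10 ^ pad.length := by
            intro hdvd
            have := h13.dvd_of_dvd_pow hdvd
            omega
          omega
        constructor
        · intro h
          have hd13 : (13 : Int) ∣ decVal 0 L := by omega
          rw [hpadv] at hd13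
          rcases (h13.dvd_mul).mp hd13 with h' | h'
          · omega
          · exact absurd (by omega : (10 : Int) ^ pad.length % 13 = 0) hpow
        · intro h
          have hdv : (13 : Int) ∣ decVal 0 L := by
            rw [hpadv]; exact Dvd.dvd.mul_right (by omega) _
          omega
      rw [Bool.eq_iff_iff, beq_iff_eq, alt_iff num hall, ← hl]
      exact hiff
    rcases (by omega : l.length % 3 = 0 ∨ l.length % 3 = 1 ∨ l.length % 3 = 2) with h3 | h3 | h3
    · rw [if_neg (by rw [pymod3]; omega), if_neg (by rw [pymod3]; omega)]
      have := key [] (by simp) (by simpa using h3)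
      simpa using this
    · rw [if_pos (by rw [pymod3]; omega)]
      have := key ['0', '0'] (by intro c hc; simpa using hc)
        (by simp; omega)
      simpa using this
    · rw [if_neg (by rw [pymod3]; omega), if_pos (by rw [pymod3]; omega)]
      have := key ['0'] (by simp) (by simp; omega)
      simpa using this
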